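-- pv_equiv track=rewrite | github.com/suresh-ambechada-multiicon/businessight | backend/analytics/services/pipeline/lookup_enrichment.py | candidate_lookup_tables
-- ===== SOURCE A (Python) =====
-- def candidate_lookup_tables(base: str, table_names: list[str]) -> list[str]:
--     base_l = base.lower()
--     wanted = [
--         base_l,
--         f"{base_l}_master",
--         f"{base_l}_masters",
--         f"{base_l}_details",
--         f"{base_l}_detail",
--         f"{base_l}s",
--     ]
--     scored: list[tuple[int, str]] = []
--     for table in table_names:
--         t = table.lower()
--         score = 0
--         if t in wanted:
--             score = 100 - wanted.index(t)
--         elif t.endswith(f"_{base_l}_master") or t.endswith(f"_{base_l}"):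
--             score = 80
--         elif base_l in t and ("master" in t or "lookup" in t or "ref" in t):
--             score = 60
--         elif base_l in t:
--             score = 30
--         if score:
--             scored.append((score, table))
--     return [table for _, table in sorted(scored, reverse=True)[:6]]
-- ===== SOURCE B (Python) =====
-- def _score(base_l: str, t: str) -> int:
--     if t == base_l:
--         return 100
--     if t == base_l + "_master":
--         return 99
--     if t == base_l + "_masters":
--         return 98
--     if t == base_l + "_details":
--         return 97
--     if t == base_l + "_detail":
--         return 96
--     if t == base_l + "s":
--         return 95
--     if t.endswith("_" + base_l + "_master") or t.endswith("_" + base_l):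
--         return 80
--     if base_l in t and ("master" in t or "lookup" in t or "ref" in t):
--         return 60
--     if base_l in t:
--         return 30
--     return 0
--
--
-- def candidate_lookup_tables(base: str, table_names: list[str]) -> list[str]:
--     base_l = base.lower()
--     scores = [_score(base_l, t.lower()) for t in table_names]
--     out: list[str] = []
--     for s in (100, 99, 98, 97, 96, 95, 80, 60, 30):
--         bucket = [t for t, sc in zip(table_names, scores) if sc == s]
--         bucket.sort(reverse=True)
--         out += bucket
--     return out[:6]
-- ===== Notes on version B (the rewrite author's own statement) =====
-- stated objective: alternative
-- what changed: B drops A's build-(score,table)-pairs-then-full-sort selection: it scores each table once via a first-match helper instead of a wanted-list index lookup, then selects the top 6 by a bucket pass over the nine possible scores in descending order, descending-sorting each score's tables and concatenating.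
import Mathlib
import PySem

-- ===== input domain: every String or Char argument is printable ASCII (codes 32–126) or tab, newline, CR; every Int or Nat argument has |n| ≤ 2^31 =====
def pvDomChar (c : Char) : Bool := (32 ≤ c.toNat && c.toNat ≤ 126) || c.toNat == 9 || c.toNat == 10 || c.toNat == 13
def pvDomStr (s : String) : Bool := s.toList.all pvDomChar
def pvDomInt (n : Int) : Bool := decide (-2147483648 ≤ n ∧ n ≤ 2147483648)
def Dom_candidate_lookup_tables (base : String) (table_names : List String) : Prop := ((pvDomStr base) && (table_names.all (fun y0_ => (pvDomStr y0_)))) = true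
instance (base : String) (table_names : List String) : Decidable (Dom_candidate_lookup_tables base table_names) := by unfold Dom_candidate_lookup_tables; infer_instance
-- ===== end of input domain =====

-- B replaces A's build-pairs-then-full-sort selection by a bucket pass over the nine possible
-- scores in descending order, collecting and descending-sorting each score's tables and taking
-- the first 6 — an alternative selection strategy of similar cost.

-- ===== PORT A =====
def candidate_lookup_tables (base : String) (table_names : List String) : List String :=
  let base_l := PySem.Str.lower base
  let wanted : List String :=
    [base_l, base_l ++ "_master", base_l ++ "_masters", base_l ++ "_details",
     base_l ++ "_detail", base_l ++ "s"]
  let scored : List (Int × String) :=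
    table_names.foldl (fun scored table =>
      let t := PySem.Str.lower table
      let score : Int :=
        if wanted.contains t then
          100 - (((PySem.List.index? wanted t).getD 0 : Nat) : Int)
        else if PySem.Str.endswith t ("_" ++ base_l ++ "_master")
                || PySem.Str.endswith t ("_" ++ base_l) then 80
        else if PySem.Str.isIn base_l t
                && (PySem.Str.isIn "master" t || PySem.Str.isIn "lookup" t
                    || PySem.Str.isIn "ref" t) then 60
        else if PySem.Str.isIn base_l t then 30
        else 0
      if score ≠ 0 then scored ++ [(score, table)] else scored) []
  (PySem.List.slice (PySem.List.sorted2 scored (fun p => p.1) (fun p => p.2) true)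
      none (some 6)).map (fun p => p.2)

-- ===== PORT B =====
def pvScoreB (base_l t : String) : Int :=
  if t == base_l then 100
  else if t == base_l ++ "_master" then 99
  else if t == base_l ++ "_masters" then 98
  else if t == base_l ++ "_details" then 97
  else if t == base_l ++ "_detail" then 96
  else if t == base_l ++ "s" then 95
  else if PySem.Str.endswith t ("_" ++ base_l ++ "_master")
          || PySem.Str.endswith t ("_" ++ base_l) then 80
  else if PySem.Str.isIn base_l t
          && (PySem.Str.isIn "master" t || PySem.Str.isIn "lookup" t
              || PySem.Str.isIn "ref" t) then 60
  else if PySem.Str.isIn base_l t then 30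
  else 0

def candidate_lookup_tables_alt (base : String) (table_names : List String) : List String :=
  let base_l := PySem.Str.lower base
  let scores := table_names.map (fun t => pvScoreB base_l (PySem.Str.lower t))
  let out := ([100, 99, 98, 97, 96, 95, 80, 60, 30] : List Int).foldl
    (fun out s =>
      out ++ PySem.List.sorted
        (((table_names.zip scores).filter (fun p => p.2 == s)).map (fun p => p.1))
        (fun x => x) true) []
  PySem.List.slice out none (some 6)

-- ===== PRECONDITION & SPEC =====
def Spec_candidate_lookup_tables (base : String) (table_names : List String) (out : List String) : Prop := out = candidate_lookup_tables_alt base table_names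
instance (base : String) (table_names : List String) (out : List String) : Decidable (Spec_candidate_lookup_tables base table_names out) := by unfold Spec_candidate_lookup_tables; infer_instance

-- ===== CLAIM (what is proved, stated in full; the proofs are below) =====
def Claim_equal_candidate_lookup_tables : Prop := ∀ (base : String) (table_names : List String), Dom_candidate_lookup_tables base table_names → Spec_candidate_lookup_tables base table_names (candidate_lookup_tables base table_names)

-- ===== LEMMAS AND PROOFS =====

-- insertion past a prefix the element never goes before
theorem pv_insertBy_append_false {α : Type} (before : α → α → Bool) (x : α)
    (l1 l2 : List α) (h : ∀ y ∈ l1, before x y = false) :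
    PySem.List.insertBy before x (l1 ++ l2) = l1 ++ PySem.List.insertBy before x l2 := by
  induction l1 with
  | nil => simp
  | cons y ys ih =>
    have hy : before x y = false := h y (by simp)
    simp [PySem.List.insertBy, hy, ih (fun z hz => h z (by simp [hz]))]

-- insertion within a block on which before agrees with before', followed by a block
-- the element always goes before
theorem pv_insertBy_append_congr {α : Type} (before before' : α → α → Bool) (x : α)
    (l rest : List α) (h1 : ∀ y ∈ l, before x y = before' x y)
    (h2 : ∀ z ∈ rest, before x z = true) :
    PySem.List.insertBy before x (l ++ rest) = PySem.List.insertBy before' x l ++ rest := by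
  induction l with
  | nil =>
    cases rest with
    | nil => simp [PySem.List.insertBy]
    | cons z zs => simp [PySem.List.insertBy, h2 z (by simp)]
  | cons y ys ih =>
    have hy : before x y = before' x y := h1 y (by simp)
    cases hb : before' x y
    · rw [hb] at hy
      simp [PySem.List.insertBy, hy, hb, ih (fun z hz => h1 z (by simp [hz]))]
    · rw [hb] at hy
      simp [PySem.List.insertBy, hy, hb]

-- insertBy commutes with a comparison-preserving map
theorem pv_insertBy_map {α β : Type} (before : β → β → Bool) (before' : α → α → Bool)
    (f : α → β) (hf : ∀ a b, before (f a) (f b) = before' a b) (x : α) (l : List α) :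
    PySem.List.insertBy before (f x) (l.map f) = (PySem.List.insertBy before' x l).map f := by
  induction l with
  | nil => simp [PySem.List.insertBy]
  | cons y ys ih =>
    simp only [List.map_cons, PySem.List.insertBy, hf]
    cases hb : before' x y
    · simp [ih]
    · simp

-- reverse-sorting constant-first-component pairs by second component is the string sort
theorem pv_sorted_map_pair (c : Int) (l : List String) :
    PySem.List.sorted (l.map (fun t => ((c : Int), t))) (fun p => p.2) true
      = (PySem.List.sorted l (fun x => x) true).map (fun t => (c, t)) := by
  have aux : ∀ (l : List String) (acc : List String),
      (l.map (fun t => ((c : Int), t))).foldl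
        (fun acc x => PySem.List.insertBy (fun a b : Int × String => decide (b.2 < a.2)) x acc)
        (acc.map (fun t => (c, t)))
      = (l.foldl (fun acc x => PySem.List.insertBy (fun a b : String => decide (b < a)) x acc) acc).map
          (fun t => (c, t)) := by
    intro l
    induction l with
    | nil => intro acc; simp
    | cons y ys ih =>
      intro acc
      simp only [List.map_cons, List.foldl_cons]
      rw [pv_insertBy_map (fun a b : Int × String => decide (b.2 < a.2))
            (fun a b : String => decide (b < a)) (fun t => (c, t)) (fun a b => rfl) y acc, ih]
  have h := aux l []
  simpa [PySem.List.sorted] using h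

-- the stable descending pair sort decomposes into score buckets
theorem pv_sorted2_bucket (S : List Int) (hS : S.Pairwise (fun a b => b < a))
    (xs : List (Int × String)) (hmem : ∀ p ∈ xs, p.1 ∈ S) :
    PySem.List.sorted2 xs (fun p => p.1) (fun p => p.2) true
      = S.flatMap (fun s =>
          PySem.List.sorted (xs.filter (fun p => p.1 == s)) (fun p => p.2) true) := by
  induction xs using List.reverseRecOn with
  | nil => simp [PySem.List.sorted2, PySem.List.sorted]
  | append_singleton xs x ih =>
    have hmem' : ∀ p ∈ xs, p.1 ∈ S := fun p hp => hmem p (by simp [hp])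
    have hx : x.1 ∈ S := hmem x (by simp)
    obtain ⟨S1, S2, hsplit⟩ := List.append_of_mem hx
    have hS' := hS
    rw [hsplit, List.pairwise_append] at hS'
    obtain ⟨hP1, hP2, hcross⟩ := hS'
    have hgt : ∀ s ∈ S1, x.1 < s := fun s hs => hcross s hs x.1 (by simp)
    have hlt : ∀ s ∈ S2, s < x.1 := fun s hs => (List.pairwise_cons.mp hP2).1 s hs
    have hL : PySem.List.sorted2 (xs ++ [x]) (fun p => p.1) (fun p => p.2) true
        = PySem.List.insertBy
            (fun a b : Int × String =>
              decide (b.1 < a.1) || (!decide (a.1 < b.1) && decide (b.2 < a.2)))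
            x (PySem.List.sorted2 xs (fun p => p.1) (fun p => p.2) true) := by
      simp [PySem.List.sorted2, List.foldl_append]
    have hbeq : ∀ s : Int, s ≠ x.1 →
        (xs ++ [x]).filter (fun p => p.1 == s) = xs.filter (fun p => p.1 == s) := by
      intro s hs
      simp [List.filter_append, Ne.symm hs]
    have hbx : PySem.List.sorted ((xs ++ [x]).filter (fun p => p.1 == x.1)) (fun p => p.2) true
        = PySem.List.insertBy (fun a b : Int × String => decide (b.2 < a.2)) x
            (PySem.List.sorted (xs.filter (fun p => p.1 == x.1)) (fun p => p.2) true) := by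
      simp [List.filter_append, PySem.List.sorted, List.foldl_append]
    have hfst : ∀ s : Int, ∀ y ∈ PySem.List.sorted (xs.filter (fun p => p.1 == s)) (fun p : Int × String => p.2) true,
        y.1 = s := by
      intro s y hy
      rw [PySem.List.mem_sorted] at hy
      exact by simpa using (List.mem_filter.mp hy).2
    rw [hL, ih hmem', hsplit, List.flatMap_append, List.flatMap_cons]
    rw [pv_insertBy_append_false _ x _ _ (by
      intro y hy
      rw [List.mem_flatMap] at hy
      obtain ⟨s, hsS, hys⟩ := hy
      have h1 : y.1 = s := hfst s y hys
      have h2 : x.1 < y.1 := h1 ▸ hgt s hsS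
      have h3 : ¬ (y.1 < x.1) := not_lt_of_gt h2
      simp [h3]
      intro hle
      exact absurd hle (not_le.mpr h2))]
    rw [pv_insertBy_append_congr _ (fun a b : Int × String => decide (b.2 < a.2)) x _ _
      (by
        intro y hy
        have h1 : y.1 = x.1 := hfst x.1 y hy
        simp [h1])
      (by
        intro z hz
        rw [List.mem_flatMap] at hz
        obtain ⟨s, hsS, hzs⟩ := hz
        have h1 : z.1 = s := hfst s z hzs
        have h2 : z.1 < x.1 := h1 ▸ hlt s hsS
        simp [h2])]
    rw [List.flatMap_append, List.flatMap_cons, hbx]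
    have e1 : (S1.flatMap fun s => PySem.List.sorted ((xs ++ [x]).filter (fun p => p.1 == s)) (fun p : Int × String => p.2) true)
        = S1.flatMap fun s => PySem.List.sorted (xs.filter (fun p => p.1 == s)) (fun p : Int × String => p.2) true := by
      rw [List.flatMap_def, List.flatMap_def]
      exact congrArg _ (List.map_congr_left (fun s hs => by rw [hbeq s (by have := hgt s hs; omega)]))
    have e2 : (S2.flatMap fun s => PySem.List.sorted ((xs ++ [x]).filter (fun p => p.1 == s)) (fun p : Int × String => p.2) true)
        = S2.flatMap fun s => PySem.List.sorted (xs.filter (fun p => p.1 == s)) (fun p : Int × String => p.2) true := by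
      rw [List.flatMap_def, List.flatMap_def]
      exact congrArg _ (List.map_congr_left (fun s hs => by rw [hbeq s (by have := hlt s hs; omega)]))
    rw [e1, e2]

-- A's inline score computation equals B's helper
theorem pv_scoreA_eq (bl t : String) :
    (if ([bl, bl ++ "_master", bl ++ "_masters", bl ++ "_details",
          bl ++ "_detail", bl ++ "s"] : List String).contains t then
        (100 : Int) - (((PySem.List.index? [bl, bl ++ "_master", bl ++ "_masters",
            bl ++ "_details", bl ++ "_detail", bl ++ "s"] t).getD 0 : Nat) : Int)
      else if PySem.Str.endswith t ("_" ++ bl ++ "_master")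
              || PySem.Str.endswith t ("_" ++ bl) then 80
      else if PySem.Str.isIn bl t
              && (PySem.Str.isIn "master" t || PySem.Str.isIn "lookup" t
                  || PySem.Str.isIn "ref" t) then 60
      else if PySem.Str.isIn bl t then 30
      else 0) = pvScoreB bl t := by
  unfold pvScoreB
  by_cases h0 : t = bl
  · subst h0
    rw [PySem.List.index?_cons_self]
    simp
  · rw [PySem.List.index?_cons_of_ne _ (Ne.symm h0)]
    by_cases h1 : t = bl ++ "_master"
    · subst h1
      rw [PySem.List.index?_cons_self]
      simp [h0]
    · rw [PySem.List.index?_cons_of_ne _ (Ne.symm h1)]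
      by_cases h2 : t = bl ++ "_masters"
      · subst h2
        rw [PySem.List.index?_cons_self]
        simp [h0, h1]
      · rw [PySem.List.index?_cons_of_ne _ (Ne.symm h2)]
        by_cases h3 : t = bl ++ "_details"
        · subst h3
          rw [PySem.List.index?_cons_self]
          simp [h0, h1, h2]
        · rw [PySem.List.index?_cons_of_ne _ (Ne.symm h3)]
          by_cases h4 : t = bl ++ "_detail"
          · subst h4
            rw [PySem.List.index?_cons_self]
            simp [h0, h1, h2, h3]
          · rw [PySem.List.index?_cons_of_ne _ (Ne.symm h4)]
            by_cases h5 : t = bl ++ "s"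
            · subst h5
              rw [PySem.List.index?_cons_self]
              simp [h0, h1, h2, h3, h4]
            · rw [PySem.List.index?_cons_of_ne _ (Ne.symm h5)]
              simp [h0, h1, h2, h3, h4, h5]

-- a non-zero score is one of the nine possible values
theorem pv_scoreB_mem (bl t : String) (h : pvScoreB bl t ≠ 0) :
    pvScoreB bl t ∈ ([100, 99, 98, 97, 96, 95, 80, 60, 30] : List Int) := by
  unfold pvScoreB at h ⊢
  split_ifs at h ⊢ <;> simp_all

-- B's zip-with-precomputed-scores bucket is a plain filter on the names
theorem pv_zip_scores (f : String → Int) (s : Int) (tn : List String) :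
    ((tn.zip (tn.map f)).filter (fun p => p.2 == s)).map (fun p => p.1)
      = tn.filter (fun t => f t == s) := by
  induction tn with
  | nil => simp
  | cons y ys ih =>
    by_cases h : f y = s
    · simp [h, ih]
    · simp [h, ih]

-- one bucket of A's sorted pair list, projected, is B's bucket of sorted table names
theorem pv_bucket (bl : String) (tn : List String) (s : Int) (hs : s ≠ 0) :
    (PySem.List.sorted
        ((((tn.filter (fun t => decide (pvScoreB bl (PySem.Str.lower t) ≠ 0))).map
            (fun t => (pvScoreB bl (PySem.Str.lower t), t))).filter (fun p => p.1 == s)))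
        (fun p => p.2) true).map (fun p => p.2)
      = PySem.List.sorted (tn.filter (fun t => pvScoreB bl (PySem.Str.lower t) == s))
          (fun x => x) true := by
  rw [List.filter_map, List.filter_filter]
  have hone : (fun t => ((fun p : Int × String => p.1 == s) ∘
          fun t => (pvScoreB bl (PySem.Str.lower t), t)) t
        && decide (pvScoreB bl (PySem.Str.lower t) ≠ 0))
      = fun t => pvScoreB bl (PySem.Str.lower t) == s := by
    funext t
    by_cases h : pvScoreB bl (PySem.Str.lower t) = s
    · simp [h, hs]
    · simp [h]
  rw [hone]
  have hmapc : (tn.filter (fun t => pvScoreB bl (PySem.Str.lower t) == s)).map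
        (fun t => (pvScoreB bl (PySem.Str.lower t), t))
      = (tn.filter (fun t => pvScoreB bl (PySem.Str.lower t) == s)).map
          (fun t => ((s : Int), t)) := by
    apply List.map_congr_left
    intro a ha
    have h2 := (List.mem_filter.mp ha).2
    simp only [beq_iff_eq] at h2
    simp [h2]
  rw [hmapc, pv_sorted_map_pair, List.map_map]
  simp

-- ===== VERDICT (by name: the statement is the Claim_ definition above) =====
theorem candidate_lookup_tables_spec : Claim_equal_candidate_lookup_tables := by
  intro base tn _
  unfold Spec_candidate_lookup_tables candidate_lookup_tables candidate_lookup_tables_alt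
  simp only [pv_scoreA_eq]
  rw [PySem.List.foldl_append_ite
      (p := fun table => pvScoreB (PySem.Str.lower base) (PySem.Str.lower table) ≠ 0)
      (f := fun table => (pvScoreB (PySem.Str.lower base) (PySem.Str.lower table), table))]
  rw [PySem.List.foldl_append_eq_flatMap
      (g := fun s => PySem.List.sorted
        (((tn.zip (tn.map (fun t => pvScoreB (PySem.Str.lower base) (PySem.Str.lower t)))).filter
            (fun p => p.2 == s)).map (fun p => p.1))
        (fun x => x) true)]
  simp only [List.nil_append]
  rw [pv_sorted2_bucket ([100, 99, 98, 97, 96, 95, 80, 60, 30] : List Int) (by decide) _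
      (by
        intro p hp
        obtain ⟨t, ht, rfl⟩ := List.mem_map.mp hp
        have h2 := (List.mem_filter.mp ht).2
        simp only [decide_eq_true_eq] at h2
        exact pv_scoreB_mem _ _ h2)]
  rw [PySem.List.slice_to _ (by norm_num), PySem.List.slice_to _ (by norm_num)]
  rw [List.map_take, List.map_flatMap]
  congr 1
  rw [List.flatMap_def, List.flatMap_def]
  congr 1
  apply List.map_congr_left
  intro s hs
  have hsne : s ≠ 0 := by
    simp only [List.mem_cons, List.not_mem_nil, or_false] at hs
    rcases hs with h|h|h|h|h|h|h|h|h <;> simp [h]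
  rw [pv_zip_scores]
  exact pv_bucket (PySem.Str.lower base) tn s hsne
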